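-- pv_equiv track=rewrite | github.com/Bili-Sakura/pytorch-image-translation-models | examples/pipelines/ddbm/pipeline.py | _build_block_types
-- ===== SOURCE A (Python) =====
-- from typing import Callable, List, Optional, Tuple, Union
--
-- def _build_block_types(
--     channel_mult: Tuple[int, ...],
--     attention_resolutions: Tuple[int, ...],
-- ) -> Tuple[Tuple[str, ...], Tuple[str, ...]]:
--     """Build down_block_types and up_block_types from channel_mult and attention indices."""
--     down_block_types = []
--     for i in range(len(channel_mult)):
--         if i in attention_resolutions:
--             down_block_types.append("AttnDownBlock2D")
--         else:
--             down_block_types.append("DownBlock2D")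
--     up_block_types = []
--     for i in range(len(channel_mult)):
--         if (len(channel_mult) - 1 - i) in attention_resolutions:
--             up_block_types.append("AttnUpBlock2D")
--         else:
--             up_block_types.append("UpBlock2D")
--     return tuple(down_block_types), tuple(up_block_types)
-- ===== SOURCE B (Python) =====
-- def _build_block_types(channel_mult, attention_resolutions):
--     """Scatter: start from plain blocks and overwrite the attention positions."""
--     n = len(channel_mult)
--     down = ["DownBlock2D"] * n
--     up = ["UpBlock2D"] * n
--     for r in attention_resolutions:
--         if 0 <= r < n:
--             down[r] = "AttnDownBlock2D"
--             up[n - 1 - r] = "AttnUpBlock2D"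
--     return tuple(down), tuple(up)
-- ===== Notes on version B (the rewrite author's own statement) =====
-- stated objective: faster
-- what changed: Replaces the two membership-testing loops over range(len(channel_mult)) by a scatter: both lists start filled with plain block names and one pass over attention_resolutions overwrites down[r] and the mirrored up[n-1-r] for in-range r, eliminating the inner membership scan.
import Mathlib
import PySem

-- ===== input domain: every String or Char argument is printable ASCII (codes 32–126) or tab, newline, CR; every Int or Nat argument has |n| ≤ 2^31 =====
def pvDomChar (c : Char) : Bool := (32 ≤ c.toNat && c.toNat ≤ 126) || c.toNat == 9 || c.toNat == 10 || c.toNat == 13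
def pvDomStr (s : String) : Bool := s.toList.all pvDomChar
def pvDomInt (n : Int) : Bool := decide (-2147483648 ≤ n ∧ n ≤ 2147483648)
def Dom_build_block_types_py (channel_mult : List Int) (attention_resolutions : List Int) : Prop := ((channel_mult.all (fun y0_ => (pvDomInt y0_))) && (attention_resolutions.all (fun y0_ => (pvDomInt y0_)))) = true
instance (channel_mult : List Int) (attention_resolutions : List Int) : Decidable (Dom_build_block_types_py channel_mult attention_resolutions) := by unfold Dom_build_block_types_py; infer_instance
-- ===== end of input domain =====

-- B replaces the two membership-testing loops by a scatter over attention_resolutions (objective: faster, O(n+m) vs O(n*m)).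

-- ===== PORT A =====
def build_block_types_py (channel_mult : List Int) (attention_resolutions : List Int) : List String × List String :=
  let down_block_types :=
    (PySem.List.pyRange 0 (channel_mult.length : Int) 1).foldl
      (fun acc i => acc ++ [if attention_resolutions.contains i then "AttnDownBlock2D" else "DownBlock2D"]) []
  let up_block_types :=
    (PySem.List.pyRange 0 (channel_mult.length : Int) 1).foldl
      (fun acc i =>
        acc ++ [if attention_resolutions.contains ((channel_mult.length : Int) - 1 - i) then "AttnUpBlock2D" else "UpBlock2D"]) []
  (down_block_types, up_block_types)

-- ===== PORT B =====
-- one step of Source B's loop body: guarded in-place writes down[r], up[n-1-r]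
-- (the guard 0 ≤ r < n makes both indices exact Nats, so List.set matches Python's assignment)
def pvScatterStep (n : Nat) (p : List String × List String) (r : Int) : List String × List String :=
  if 0 ≤ r ∧ r < (n : Int) then
    (p.1.set r.toNat "AttnDownBlock2D", p.2.set (n - 1 - r.toNat) "AttnUpBlock2D")
  else p

def build_block_types_py_alt (channel_mult : List Int) (attention_resolutions : List Int) : List String × List String :=
  let n := channel_mult.length
  attention_resolutions.foldl (pvScatterStep n)
    (List.replicate n "DownBlock2D", List.replicate n "UpBlock2D")

-- ===== PRECONDITION & SPEC =====
def Spec_build_block_types_py (channel_mult : List Int) (attention_resolutions : List Int) (out : List String × List String) : Prop := out = build_block_types_py_alt channel_mult attention_resolutions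
instance (channel_mult : List Int) (attention_resolutions : List Int) (out : List String × List String) : Decidable (Spec_build_block_types_py channel_mult attention_resolutions out) := by unfold Spec_build_block_types_py; infer_instance

-- ===== CLAIM (what is proved, stated in full; the proofs are below) =====
def Claim_equal_build_block_types_py : Prop := ∀ (channel_mult : List Int) (attention_resolutions : List Int), Dom_build_block_types_py channel_mult attention_resolutions → Spec_build_block_types_py channel_mult attention_resolutions (build_block_types_py channel_mult attention_resolutions)

-- ===== LEMMAS AND PROOFS =====

theorem scatter_step_pos (n : Nat) (p : List String × List String) (r : Int)
    (hg : 0 ≤ r ∧ r < (n : Int)) :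
    pvScatterStep n p r = (p.1.set r.toNat "AttnDownBlock2D", p.2.set (n - 1 - r.toNat) "AttnUpBlock2D") := by
  unfold pvScatterStep; rw [if_pos hg]

theorem scatter_step_neg (n : Nat) (p : List String × List String) (r : Int)
    (hg : ¬ (0 ≤ r ∧ r < (n : Int))) : pvScatterStep n p r = p := by
  unfold pvScatterStep; rw [if_neg hg]

theorem exists_cons_iff (P : Int → Prop) (r : Int) (rs : List Int) :
    (∃ r' ∈ r :: rs, P r') ↔ P r ∨ ∃ r' ∈ rs, P r' := by
  simp

theorem scatter_down_get (n : Nat) (ars : List Int) (p : List String × List String) (i : Nat) :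
    ((ars.foldl (pvScatterStep n) p).1)[i]? =
      if ∃ r ∈ ars, 0 ≤ r ∧ r < (n : Int) ∧ r.toNat = i then
        (if i < p.1.length then some "AttnDownBlock2D" else none)
      else p.1[i]? := by
  induction ars generalizing p with
  | nil => simp
  | cons r rs ih =>
    simp only [List.foldl_cons]
    by_cases hg : 0 ≤ r ∧ r < (n : Int)
    · rw [scatter_step_pos n p r hg, ih]
      simp only [List.length_set]
      by_cases hex : ∃ r' ∈ rs, 0 ≤ r' ∧ r' < (n : Int) ∧ r'.toNat = i
      · have hcons : ∃ r' ∈ r :: rs, 0 ≤ r' ∧ r' < (n : Int) ∧ r'.toNat = i := by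
          rw [exists_cons_iff]; exact Or.inr hex
        rw [if_pos hex, if_pos hcons]
      · rw [if_neg hex]
        by_cases hr : r.toNat = i
        · have hcons : ∃ r' ∈ r :: rs, 0 ≤ r' ∧ r' < (n : Int) ∧ r'.toNat = i := by
            rw [exists_cons_iff]; exact Or.inl ⟨hg.1, hg.2, hr⟩
          rw [List.getElem?_set, if_pos hr, if_pos hcons, hr]
        · have hcons : ¬ ∃ r' ∈ r :: rs, 0 ≤ r' ∧ r' < (n : Int) ∧ r'.toNat = i := by
            rw [exists_cons_iff]
            rintro (⟨_, _, h⟩ | h)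
            · exact hr h
            · exact hex h
          rw [List.getElem?_set_ne hr, if_neg hcons]
    · rw [scatter_step_neg n p r hg, ih]
      by_cases hex : ∃ r' ∈ rs, 0 ≤ r' ∧ r' < (n : Int) ∧ r'.toNat = i
      · have hcons : ∃ r' ∈ r :: rs, 0 ≤ r' ∧ r' < (n : Int) ∧ r'.toNat = i := by
          rw [exists_cons_iff]; exact Or.inr hex
        rw [if_pos hex, if_pos hcons]
      · have hcons : ¬ ∃ r' ∈ r :: rs, 0 ≤ r' ∧ r' < (n : Int) ∧ r'.toNat = i := by
          rw [exists_cons_iff]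
          rintro (⟨h0, h1, _⟩ | h)
          · exact hg ⟨h0, h1⟩
          · exact hex h
        rw [if_neg hex, if_neg hcons]

theorem scatter_up_get (n : Nat) (ars : List Int) (p : List String × List String) (i : Nat) :
    ((ars.foldl (pvScatterStep n) p).2)[i]? =
      if ∃ r ∈ ars, 0 ≤ r ∧ r < (n : Int) ∧ n - 1 - r.toNat = i then
        (if i < p.2.length then some "AttnUpBlock2D" else none)
      else p.2[i]? := by
  induction ars generalizing p with
  | nil => simp
  | cons r rs ih =>
    simp only [List.foldl_cons]
    by_cases hg : 0 ≤ r ∧ r < (n : Int)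
    · rw [scatter_step_pos n p r hg, ih]
      simp only [List.length_set]
      by_cases hex : ∃ r' ∈ rs, 0 ≤ r' ∧ r' < (n : Int) ∧ n - 1 - r'.toNat = i
      · have hcons : ∃ r' ∈ r :: rs, 0 ≤ r' ∧ r' < (n : Int) ∧ n - 1 - r'.toNat = i := by
          rw [exists_cons_iff]; exact Or.inr hex
        rw [if_pos hex, if_pos hcons]
      · rw [if_neg hex]
        by_cases hr : n - 1 - r.toNat = i
        · have hcons : ∃ r' ∈ r :: rs, 0 ≤ r' ∧ r' < (n : Int) ∧ n - 1 - r'.toNat = i := by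
            rw [exists_cons_iff]; exact Or.inl ⟨hg.1, hg.2, hr⟩
          rw [List.getElem?_set, if_pos hr, if_pos hcons, hr]
        · have hcons : ¬ ∃ r' ∈ r :: rs, 0 ≤ r' ∧ r' < (n : Int) ∧ n - 1 - r'.toNat = i := by
            rw [exists_cons_iff]
            rintro (⟨_, _, h⟩ | h)
            · exact hr h
            · exact hex h
          rw [List.getElem?_set_ne hr, if_neg hcons]
    · rw [scatter_step_neg n p r hg, ih]
      by_cases hex : ∃ r' ∈ rs, 0 ≤ r' ∧ r' < (n : Int) ∧ n - 1 - r'.toNat = i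
      · have hcons : ∃ r' ∈ r :: rs, 0 ≤ r' ∧ r' < (n : Int) ∧ n - 1 - r'.toNat = i := by
          rw [exists_cons_iff]; exact Or.inr hex
        rw [if_pos hex, if_pos hcons]
      · have hcons : ¬ ∃ r' ∈ r :: rs, 0 ≤ r' ∧ r' < (n : Int) ∧ n - 1 - r'.toNat = i := by
          rw [exists_cons_iff]
          rintro (⟨h0, h1, _⟩ | h)
          · exact hg ⟨h0, h1⟩
          · exact hex h
        rw [if_neg hex, if_neg hcons]

theorem build_block_types_py_equal (channel_mult : List Int) (attention_resolutions : List Int) :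
    build_block_types_py channel_mult attention_resolutions
      = build_block_types_py_alt channel_mult attention_resolutions := by
  unfold build_block_types_py build_block_types_py_alt
  simp only [PySem.List.foldl_append_singleton_eq_map, PySem.List.pyRange_zero_natCast,
    List.nil_append, List.map_map]
  set n := channel_mult.length with hn
  refine Prod.ext ?_ ?_
  · apply List.ext_getElem?
    intro i
    rw [scatter_down_get]
    simp only [List.length_replicate, List.getElem?_replicate, List.getElem?_map]
    by_cases hi : i < n
    · have hiff : (∃ r ∈ attention_resolutions, 0 ≤ r ∧ r < (n : Int) ∧ r.toNat = i) ↔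
          attention_resolutions.contains ((i : Nat) : Int) = true := by
        rw [List.contains_iff_mem]
        constructor
        · rintro ⟨r, hm, h0, _, hri⟩
          have : r = ((i : Nat) : Int) := by omega
          exact this ▸ hm
        · intro hm
          exact ⟨((i : Nat) : Int), hm, by omega, by omega, by omega⟩
      rw [List.getElem?_range hi]
      simp only [Option.map_some]
      by_cases hc : attention_resolutions.contains ((i : Nat) : Int) = true
      · rw [if_pos (hiff.2 hc), if_pos hi]
        simp only [Function.comp_apply, Option.some.injEq]
        rw [if_pos hc]
      · have hne := fun h => hc (hiff.1 h)
        rw [if_neg hne]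
        simp only [Function.comp_apply]
        rw [if_neg hc, if_pos hi]
    · rw [List.getElem?_eq_none (by simpa using hi)]
      simp only [Option.map_none]
      rw [if_neg hi]
      split <;> rfl
  · apply List.ext_getElem?
    intro i
    rw [scatter_up_get]
    simp only [List.length_replicate, List.getElem?_replicate, List.getElem?_map]
    by_cases hi : i < n
    · have hiff : (∃ r ∈ attention_resolutions, 0 ≤ r ∧ r < (n : Int) ∧ n - 1 - r.toNat = i) ↔
          attention_resolutions.contains ((n : Int) - 1 - ((i : Nat) : Int)) = true := by
        rw [List.contains_iff_mem]
        constructor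
        · rintro ⟨r, hm, h0, hlt, hri⟩
          have : r = (n : Int) - 1 - ((i : Nat) : Int) := by omega
          exact this ▸ hm
        · intro hm
          exact ⟨(n : Int) - 1 - ((i : Nat) : Int), hm, by omega, by omega, by omega⟩
      rw [List.getElem?_range hi]
      simp only [Option.map_some]
      by_cases hc : attention_resolutions.contains ((n : Int) - 1 - ((i : Nat) : Int)) = true
      · rw [if_pos (hiff.2 hc), if_pos hi]
        simp only [Function.comp_apply, Option.some.injEq]
        rw [if_pos hc]
      · have hne := fun h => hc (hiff.1 h)
        rw [if_neg hne]
        simp only [Function.comp_apply]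
        rw [if_neg hc, if_pos hi]
    · rw [List.getElem?_eq_none (by simpa using hi)]
      simp only [Option.map_none]
      rw [if_neg hi]
      split <;> rfl

-- ===== VERDICT (by name: the statement is the Claim_ definition above) =====
theorem build_block_types_py_spec : Claim_equal_build_block_types_py := by
  intro cm ar _
  exact build_block_types_py_equal cm ar
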